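-- pv_equiv track=rewrite | github.com/Nuullll/google-kickstart | 2019/Practice/hard.py | solve
-- ===== SOURCE A (Python) =====
-- MOD = 1000000007
--
-- def solve(case):
--     N, K, A = case
--
--     # POWER = SUM(POWER_i) = SUM(digit_sums[i-1] * (i^1 + i^2 + ... + i^K))
--     # which can be simplified by the sum formula of equal-ratio series:
--     # i^1 + ... + i^K = i*(i^K-1)/(i-1)
--
--     digit_sum = 0
--     power = 0
--     for i in range(N):
--         digit_sum = (digit_sum + A[N-1-i] * (i+1)) % MOD
--
--         if i == N - 1:
--             power = (power + digit_sum * K) % MOD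
--         else:
--             power = (power + digit_sum * (N-i) * (pow(N-i, K, MOD) - 1) * pow(N-i-1, MOD-2, MOD)) % MOD
--
--     return power
-- ===== SOURCE B (Python) =====
-- MOD = 1000000007
--
--
-- def term(b, K):
--     # power-sum coefficient for base b, exactly as in the closed form:
--     # K for b == 1, else b*(b^K - 1)/(b - 1) via the Fermat inverse.
--     if b == 1:
--         return K % MOD
--     return b * (pow(b, K, MOD) - 1) * pow(b - 1, MOD - 2, MOD) % MOD
--
--
-- def solve(case):
--     # Summation order swapped (Fubini): instead of A's running weighted digit
--     # prefix sum multiplied by a per-step geometric term, walk the array left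
--     # to right keeping T = term(1)+...+term(b) and add A[b-1]*(N-b+1)*T.
--     N, K, A = case
--     T = 0
--     power = 0
--     for b in range(1, N + 1):
--         T = (T + term(b, K)) % MOD
--         power = (power + A[b - 1] * (N - b + 1) * T) % MOD
--     return power
-- ===== Notes on version B (the rewrite author's own statement) =====
-- stated objective: alternative
-- what changed: Summation order swapped (Fubini): A walks i upward keeping a running weighted digit prefix-sum and multiplies it by a per-step geometric coefficient; B walks the array left-to-right keeping a running sum T of the same closed-form coefficients term(1..b) and accumulates A[b-1]*(N-b+1)*T, so the digit prefix-sum accumulator disappears.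
import Mathlib
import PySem

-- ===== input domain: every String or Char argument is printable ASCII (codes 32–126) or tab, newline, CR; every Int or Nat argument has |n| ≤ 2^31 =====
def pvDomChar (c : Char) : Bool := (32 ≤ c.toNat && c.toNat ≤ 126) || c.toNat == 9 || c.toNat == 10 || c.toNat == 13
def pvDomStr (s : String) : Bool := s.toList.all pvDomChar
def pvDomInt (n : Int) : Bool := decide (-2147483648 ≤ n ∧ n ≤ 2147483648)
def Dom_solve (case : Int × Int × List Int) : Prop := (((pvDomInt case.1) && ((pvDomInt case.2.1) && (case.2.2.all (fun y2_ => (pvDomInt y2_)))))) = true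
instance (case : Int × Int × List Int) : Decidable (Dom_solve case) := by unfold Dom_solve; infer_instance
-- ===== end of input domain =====

-- B swaps the summation order (Fubini): A keeps a running weighted digit prefix-sum times a
-- per-step geometric coefficient; B scans the array left-to-right keeping a running sum T of
-- the same coefficients and accumulates A[b-1]*(N-b+1)*T; objective: alternative.

-- ===== PORT A =====
-- hand-port of Python's pow(b, e, 1000000007) including a negative exponent e (computed via
-- the Fermat inverse b^(10^9+5), the same residue); exact unless e < 0 and 10^9+7 ∣ b, where
-- Python raises ValueError — those inputs are outside Pre_solve.
def pyPowMod (b e : Int) : Int :=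
  if e < 0 then PySem.Int.powMod b (1000000005 * (-e).toNat) 1000000007
  else PySem.Int.powMod b e.toNat 1000000007

-- one iteration of A's loop, state (digit_sum, power), loop variable i
def stepA (N K : Int) (A : List Int) (s : Int × Int) (i : Int) : Int × Int :=
  let ds := PySem.Int.mod (s.1 + PySem.List.pyGetD A (N - 1 - i) 0 * (i + 1)) 1000000007
  let pw := if i = N - 1 then
      PySem.Int.mod (s.2 + ds * K) 1000000007
    else
      PySem.Int.mod (s.2 + ds * (N - i) * (pyPowMod (N - i) K - 1) *
        PySem.Int.powMod (N - i - 1) 1000000005 1000000007) 1000000007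
  (ds, pw)

def solve (case : Int × Int × List Int) : Int :=
  let N := case.1
  let K := case.2.1
  let A := case.2.2
  ((PySem.List.pyRange 0 N 1).foldl (stepA N K A) ((0 : Int), (0 : Int))).2

-- ===== PORT B =====
-- Source B's term(b, K): the power-sum coefficient for base b
def term1 (b K : Int) : Int :=
  if b = 1 then PySem.Int.mod K 1000000007
  else PySem.Int.mod (b * (pyPowMod b K - 1) *
    PySem.Int.powMod (b - 1) 1000000005 1000000007) 1000000007

-- one iteration of B's loop, state (T, power), loop variable b
def stepB (N K : Int) (A : List Int) (s : Int × Int) (b : Int) : Int × Int :=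
  let T := PySem.Int.mod (s.1 + term1 b K) 1000000007
  (T, PySem.Int.mod (s.2 + PySem.List.pyGetD A (b - 1) 0 * (N - b + 1) * T) 1000000007)

def solve_alt (case : Int × Int × List Int) : Int :=
  let N := case.1
  let K := case.2.1
  let A := case.2.2
  ((PySem.List.pyRange 1 (N + 1) 1).foldl (stepB N K A) ((0 : Int), (0 : Int))).2

-- ===== PRECONDITION & SPEC =====
-- Pre_ excludes only inputs on which A raises: N > len(A) (IndexError at A[N-1]), and
-- K < 0 together with N ≥ 10^9+7 (the loop reaches base 10^9+7 and pow(base, K, MOD)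
-- with a negative exponent raises ValueError on a base divisible by the modulus).
def Pre_solve (case : Int × Int × List Int) : Prop :=
  case.1 ≤ (case.2.2.length : Int) ∧ ¬(case.2.1 < 0 ∧ 1000000007 ≤ case.1)
instance (case : Int × Int × List Int) : Decidable (Pre_solve case) := by
  unfold Pre_solve; infer_instance

def pvWitness_solve : (Int × Int × List Int) := (3, 2, [1, 2, 3])

def Spec_solve (case : Int × Int × List Int) (out : Int) : Prop := out = solve_alt case
instance (case : Int × Int × List Int) (out : Int) : Decidable (Spec_solve case out) := by
  unfold Spec_solve; infer_instance

-- ===== CLAIM (what is proved, stated in full; the proofs are below) =====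
def Claim_equal_solve : Prop :=
  ∀ (case : Int × Int × List Int), Dom_solve case → Pre_solve case → Spec_solve case (solve case)

-- ===== LEMMAS AND PROOFS =====

-- cast through a (positive) Python mod
lemma cast_mod (x : Int) :
    ((PySem.Int.mod x 1000000007 : Int) : ZMod 1000000007) = (x : ZMod 1000000007) := by
  rw [PySem.Int.mod_eq_emod_of_pos (by norm_num)]
  exact_mod_cast ZMod.intCast_mod x 1000000007

-- two ints in [0, 10^9+7) with equal casts are equal
lemma int_eq_of_cast_eq {a b : Int} (ha0 : 0 ≤ a) (ha1 : a < 1000000007)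
    (hb0 : 0 ≤ b) (hb1 : b < 1000000007)
    (h : (a : ZMod 1000000007) = (b : ZMod 1000000007)) : a = b := by
  have h2 := (ZMod.intCast_eq_intCast_iff a b 1000000007).mp h
  simp only [Int.ModEq] at h2
  omega

-- A's digit weight at step t, as an integer
def wA (N : Int) (A : List Int) (t : ℕ) : Int :=
  PySem.List.pyGetD A (N - 1 - (t : Int)) 0 * ((t : Int) + 1)

-- A's per-step geometric coefficient at step i, in ZMod
def cA (N K : Int) (i : ℕ) : ZMod 1000000007 :=
  if (i : Int) = N - 1 then (K : ZMod 1000000007)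
  else (((N - (i : Int)) * (pyPowMod (N - (i : Int)) K - 1) *
    PySem.Int.powMod (N - (i : Int) - 1) 1000000005 1000000007 : Int) : ZMod 1000000007)

-- B's coefficient for base u+1, in ZMod
def gB (K : Int) (u : ℕ) : ZMod 1000000007 := ((term1 ((u : Int) + 1) K : Int) : ZMod 1000000007)

-- B's array weight at loop index j (loop variable b = j+1), as an integer
def vB (N : Int) (A : List Int) (j : ℕ) : Int :=
  PySem.List.pyGetD A ((j : Int) + 1 - 1) 0 * (N - ((j : Int) + 1) + 1)

-- invariant of A's fold over range(m)
lemma foldA_inv (N K : Int) (A : List Int) (m : ℕ) :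
    (((((PySem.List.pyRange 0 (m : Int) 1).foldl (stepA N K A) ((0 : Int), (0 : Int))).1 : Int) :
        ZMod 1000000007) =
      ∑ t ∈ Finset.range m, ((wA N A t : Int) : ZMod 1000000007)) ∧
    (((((PySem.List.pyRange 0 (m : Int) 1).foldl (stepA N K A) ((0 : Int), (0 : Int))).2 : Int) :
        ZMod 1000000007) =
      ∑ i ∈ Finset.range m,
        (∑ t ∈ Finset.range (i + 1), ((wA N A t : Int) : ZMod 1000000007)) * cA N K i) ∧
    0 ≤ ((PySem.List.pyRange 0 (m : Int) 1).foldl (stepA N K A) ((0 : Int), (0 : Int))).2 ∧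
    ((PySem.List.pyRange 0 (m : Int) 1).foldl (stepA N K A) ((0 : Int), (0 : Int))).2 < 1000000007 := by
  induction m with
  | zero => simp [PySem.List.pyRange_one_eq_nil (by omega : (0:Int) ≤ 0)]
  | succ m ih =>
    obtain ⟨ih1, ih2, ih3, ih4⟩ := ih
    have hsplit : PySem.List.pyRange 0 ((m + 1 : ℕ) : Int) 1 =
        PySem.List.pyRange 0 (m : Int) 1 ++ [(m : Int)] := by
      push_cast
      exact PySem.List.pyRange_one_succ_right (by positivity)
    rw [hsplit, List.foldl_append]
    set F := (PySem.List.pyRange 0 (m : Int) 1).foldl (stepA N K A) ((0 : Int), (0 : Int)) with hF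
    simp only [List.foldl_cons, List.foldl_nil]
    have hds : ((stepA N K A F (m : Int)).1 : ZMod 1000000007) =
        ∑ t ∈ Finset.range (m + 1), ((wA N A t : Int) : ZMod 1000000007) := by
      simp only [stepA]
      rw [cast_mod, Finset.sum_range_succ, ← ih1, wA]
      push_cast
      ring
    refine ⟨hds, ?_, ?_, ?_⟩
    · rw [Finset.sum_range_succ, ← ih2, ← hds]
      simp only [stepA, cA]
      by_cases h : (m : Int) = N - 1
      · rw [if_pos h, if_pos h, cast_mod]
        push_cast
        ring
      · rw [if_neg h, if_neg h, cast_mod]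
        push_cast
        ring
    · simp only [stepA]
      split_ifs <;> exact PySem.Int.mod_nonneg _ (by norm_num)
    · simp only [stepA]
      split_ifs <;> exact PySem.Int.mod_lt _ (by norm_num)

-- invariant of B's fold over range(1, m+1)
lemma foldB_inv (N K : Int) (A : List Int) (m : ℕ) :
    (((((PySem.List.pyRange 1 ((m : Int) + 1) 1).foldl (stepB N K A) ((0 : Int), (0 : Int))).1 : Int) :
        ZMod 1000000007) = ∑ u ∈ Finset.range m, gB K u) ∧
    (((((PySem.List.pyRange 1 ((m : Int) + 1) 1).foldl (stepB N K A) ((0 : Int), (0 : Int))).2 : Int) :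
        ZMod 1000000007) =
      ∑ j ∈ Finset.range m,
        ((vB N A j : Int) : ZMod 1000000007) * ∑ u ∈ Finset.range (j + 1), gB K u) ∧
    0 ≤ ((PySem.List.pyRange 1 ((m : Int) + 1) 1).foldl (stepB N K A) ((0 : Int), (0 : Int))).2 ∧
    ((PySem.List.pyRange 1 ((m : Int) + 1) 1).foldl (stepB N K A) ((0 : Int), (0 : Int))).2 < 1000000007 := by
  induction m with
  | zero => simp
  | succ m ih =>
    obtain ⟨ih1, ih2, ih3, ih4⟩ := ih
    have hsplit : PySem.List.pyRange 1 (((m + 1 : ℕ) : Int) + 1) 1 =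
        PySem.List.pyRange 1 ((m : Int) + 1) 1 ++ [(m : Int) + 1] := by
      push_cast
      exact PySem.List.pyRange_one_succ_right (by omega)
    rw [hsplit, List.foldl_append]
    set G := (PySem.List.pyRange 1 ((m : Int) + 1) 1).foldl (stepB N K A) ((0 : Int), (0 : Int)) with hG
    simp only [List.foldl_cons, List.foldl_nil]
    have hT : ((stepB N K A G ((m : Int) + 1)).1 : ZMod 1000000007) =
        ∑ u ∈ Finset.range (m + 1), gB K u := by
      simp only [stepB]
      rw [cast_mod, Finset.sum_range_succ, ← ih1, gB]
      push_cast
      ring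
    refine ⟨hT, ?_, ?_, ?_⟩
    · rw [Finset.sum_range_succ, ← ih2, ← hT]
      simp only [stepB]
      rw [cast_mod, vB]
      push_cast
      ring
    · exact PySem.Int.mod_nonneg _ (by norm_num)
    · exact PySem.Int.mod_lt _ (by norm_num)

-- triangular double sum: sum over i of prefixes = sum over t of suffixes
lemma sum_tri {R : Type} [AddCommMonoid R] (f : ℕ → ℕ → R) (n : ℕ) :
    ∑ i ∈ Finset.range n, ∑ t ∈ Finset.range (i + 1), f t i =
      ∑ t ∈ Finset.range n, ∑ i ∈ Finset.Ico t n, f t i := by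
  induction n with
  | zero => simp
  | succ n ih =>
    rw [Finset.sum_range_succ _ n, ih, Finset.sum_range_succ (fun t => ∑ i ∈ Finset.Ico t (n + 1), f t i)]
    have h1 : ∀ t ∈ Finset.range n, ∑ i ∈ Finset.Ico t (n + 1), f t i =
        (∑ i ∈ Finset.Ico t n, f t i) + f t n := by
      intro t ht
      have ht' := Finset.mem_range.mp ht
      exact Finset.sum_Ico_succ_top (by omega) _
    rw [Finset.sum_congr rfl h1, Finset.sum_add_distrib,
      Finset.sum_Ico_succ_top (le_refl n), Finset.Ico_self, Finset.sum_empty, zero_add,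
      Finset.sum_range_succ _ n]
    abel

-- the summation-order swap
lemma fubini {R : Type} [CommRing R] (W γ : ℕ → R) (n : ℕ) :
    ∑ i ∈ Finset.range n, (∑ t ∈ Finset.range (i + 1), W t) * γ (n - i) =
      ∑ j ∈ Finset.range n, W (n - 1 - j) * ∑ u ∈ Finset.range (j + 1), γ (u + 1) := by
  calc ∑ i ∈ Finset.range n, (∑ t ∈ Finset.range (i + 1), W t) * γ (n - i)
      = ∑ i ∈ Finset.range n, ∑ t ∈ Finset.range (i + 1), W t * γ (n - i) := by
        simp [Finset.sum_mul]
    _ = ∑ t ∈ Finset.range n, ∑ i ∈ Finset.Ico t n, W t * γ (n - i) :=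
        sum_tri (fun t i => W t * γ (n - i)) n
    _ = ∑ t ∈ Finset.range n, W t * ∑ u ∈ Finset.range (n - t), γ (u + 1) := by
        refine Finset.sum_congr rfl fun t ht => ?_
        have ht' := Finset.mem_range.mp ht
        rw [← Finset.mul_sum]
        congr 1
        rw [Finset.sum_Ico_eq_sum_range, ← Finset.sum_range_reflect]
        refine Finset.sum_congr rfl fun k hk => ?_
        have hk' := Finset.mem_range.mp hk
        congr 1
        omega
    _ = ∑ j ∈ Finset.range n, W (n - 1 - j) *
          ∑ u ∈ Finset.range (n - (n - 1 - j)), γ (u + 1) :=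
        (Finset.sum_range_reflect (fun t => W t * ∑ u ∈ Finset.range (n - t), γ (u + 1)) n).symm
    _ = ∑ j ∈ Finset.range n, W (n - 1 - j) * ∑ u ∈ Finset.range (j + 1), γ (u + 1) := by
        refine Finset.sum_congr rfl fun j hj => ?_
        have hj' := Finset.mem_range.mp hj
        have h : n - (n - 1 - j) = j + 1 := by omega
        rw [h]

-- A's coefficient is B's coefficient at the mirrored base
lemma cA_eq_gamma (K : Int) (n : ℕ) (i : ℕ) (hi : i < n) :
    cA (n : Int) K i = ((term1 (((n - i : ℕ) : Int)) K : Int) : ZMod 1000000007) := by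
  by_cases h : (i : Int) = (n : Int) - 1
  · have hni : ((n - i : ℕ) : Int) = 1 := by omega
    rw [cA, if_pos h, hni, term1, if_pos rfl, cast_mod]
  · have hni : ((n - i : ℕ) : Int) = (n : Int) - (i : Int) := by omega
    have hne : ((n - i : ℕ) : Int) ≠ 1 := by omega
    rw [cA, if_neg h, term1, if_neg hne, cast_mod, hni]

-- ===== VERDICT (by name: the statement is the Claim_ definition above) =====
theorem solve_spec : Claim_equal_solve := by
  rintro ⟨N, K, A⟩ hdom hpre
  show solve (N, K, A) = solve_alt (N, K, A)
  unfold solve solve_alt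
  simp only
  by_cases hN : N ≤ 0
  · rw [PySem.List.pyRange_one_eq_nil hN, PySem.List.pyRange_one_eq_nil (by omega)]
    rfl
  · have hNn : ((N.toNat : ℕ) : Int) = N := Int.toNat_of_nonneg (by omega)
    set n := N.toNat with hn
    rw [← hNn]
    obtain ⟨_, hA2, hA3, hA4⟩ := foldA_inv ((n : ℕ) : Int) K A n
    obtain ⟨_, hB2, hB3, hB4⟩ := foldB_inv ((n : ℕ) : Int) K A n
    refine int_eq_of_cast_eq hA3 hA4 hB3 hB4 ?_
    rw [hA2, hB2]
    calc ∑ i ∈ Finset.range n,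
          (∑ t ∈ Finset.range (i + 1), ((wA ((n : ℕ) : Int) A t : Int) : ZMod 1000000007)) *
            cA ((n : ℕ) : Int) K i
        = ∑ i ∈ Finset.range n,
            (∑ t ∈ Finset.range (i + 1), ((wA ((n : ℕ) : Int) A t : Int) : ZMod 1000000007)) *
              ((term1 (((n - i : ℕ) : Int)) K : Int) : ZMod 1000000007) := by
          refine Finset.sum_congr rfl fun i hi => ?_
          rw [cA_eq_gamma K n i (Finset.mem_range.mp hi)]
      _ = ∑ j ∈ Finset.range n,
            ((wA ((n : ℕ) : Int) A (n - 1 - j) : Int) : ZMod 1000000007) *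
              ∑ u ∈ Finset.range (j + 1),
                ((term1 (((u + 1 : ℕ) : Int)) K : Int) : ZMod 1000000007) :=
          fubini (fun t => ((wA ((n : ℕ) : Int) A t : Int) : ZMod 1000000007))
            (fun b => ((term1 ((b : ℕ) : Int) K : Int) : ZMod 1000000007)) n
      _ = ∑ j ∈ Finset.range n,
            ((vB ((n : ℕ) : Int) A j : Int) : ZMod 1000000007) *
              ∑ u ∈ Finset.range (j + 1), gB K u := by
          refine Finset.sum_congr rfl fun j hj => ?_
          have hj' := Finset.mem_range.mp hj
          have hw : wA ((n : ℕ) : Int) A (n - 1 - j) = vB ((n : ℕ) : Int) A j := by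
            rw [wA, vB]
            have e1 : ((n : ℕ) : Int) - 1 - ((n - 1 - j : ℕ) : Int) = (j : Int) + 1 - 1 := by omega
            have e2 : (((n - 1 - j : ℕ) : Int)) + 1 = ((n : ℕ) : Int) - ((j : Int) + 1) + 1 := by omega
            rw [e1, e2]
          rw [hw]
          refine congrArg _ (Finset.sum_congr rfl fun u hu => ?_)
          have e3 : ((u + 1 : ℕ) : Int) = (u : Int) + 1 := by push_cast; ring
          rw [gB, e3]
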